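-- pv_equiv track=rewrite | github.com/danwanamaker/uno-project | hand_functions.py | readout
-- ===== SOURCE A (Python) =====
-- def decode(card):
--     color = decode_color(card)
--     if card[1] == 'r':  # Generate the second part of the English name of the card.
--         decoded = color + ' Reverse'
--     elif card[1] == 'd':
--         decoded = color + ' Draw 2'
--     elif card[1] == 's':
--         decoded = color + ' Skip'
--     elif card[1] == 'w':
--         if color == '':
--             decoded = 'Wild'
--         else:
--             decoded = 'Wild (play {})'.format(color)
--     elif card[1] == 'f':
--         if color == '':
--             decoded = 'Wild Draw 4'
--         else:
--             decoded = 'Wild Draw 4 (play {})'.format(color)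
--     else:
--         decoded = color + ' ' + card[1]
--     return decoded
--
-- def decode_color(card):
--     color = ''
--     if card[0] == 'r':  # Generate the first part of the English name of the card.
--         color = 'Red'
--     elif card[0] == 'y':
--         color = 'Yellow'
--     elif card[0] == 'g':
--         color = 'Green'
--     elif card[0] == 'b':
--         color = 'Blue'
--     return color
--
-- def readout(hand):
--     output = ''
--     count = 2
--     for card in hand:
--         english = decode(card)
--         output += english
--         if count < len(hand):
--             output += ', '
--         elif count == len(hand):
--             output += ', and '
--         count += 1
--     return output
-- ===== SOURCE B (Python) =====
-- def decode(card):
--     color = decode_color(card)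
--     if card[1] == 'r':
--         decoded = color + ' Reverse'
--     elif card[1] == 'd':
--         decoded = color + ' Draw 2'
--     elif card[1] == 's':
--         decoded = color + ' Skip'
--     elif card[1] == 'w':
--         if color == '':
--             decoded = 'Wild'
--         else:
--             decoded = 'Wild (play {})'.format(color)
--     elif card[1] == 'f':
--         if color == '':
--             decoded = 'Wild Draw 4'
--         else:
--             decoded = 'Wild Draw 4 (play {})'.format(color)
--     else:
--         decoded = color + ' ' + card[1]
--     return decoded
--
-- def decode_color(card):
--     color = ''
--     if card[0] == 'r':
--         color = 'Red'
--     elif card[0] == 'y':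
--         color = 'Yellow'
--     elif card[0] == 'g':
--         color = 'Green'
--     elif card[0] == 'b':
--         color = 'Blue'
--     return color
--
-- def readout(hand):
--     names = [decode(card) for card in hand]
--     if not names:
--         return ''
--     if len(names) == 1:
--         return names[0]
--     return ', '.join(names[:-1]) + ', and ' + names[-1]
-- ===== Notes on version B (the rewrite author's own statement) =====
-- stated objective: simpler
-- what changed: B decodes all cards into a name list first and builds the sentence structurally (empty / single / join-all-but-last + ', and ' + last) instead of A's single pass with a running counter compared against len(hand) to pick each separator.
import Mathlib
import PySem

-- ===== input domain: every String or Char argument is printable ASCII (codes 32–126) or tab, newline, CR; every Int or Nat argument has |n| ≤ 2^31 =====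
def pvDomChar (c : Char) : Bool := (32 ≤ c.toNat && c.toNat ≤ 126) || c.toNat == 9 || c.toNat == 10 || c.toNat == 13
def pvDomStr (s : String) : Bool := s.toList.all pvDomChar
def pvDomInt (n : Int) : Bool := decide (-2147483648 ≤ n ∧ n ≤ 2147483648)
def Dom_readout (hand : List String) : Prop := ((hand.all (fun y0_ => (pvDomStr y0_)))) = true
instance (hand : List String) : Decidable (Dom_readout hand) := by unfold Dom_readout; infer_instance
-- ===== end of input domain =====

-- B decodes every card first and joins the names structurally (join all but last + ', and ' + last) instead of A's counter-driven separator loop; same cost, simpler.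
-- ===== PORT A =====
-- shared helpers (both Pythons use the same decode/decode_color)
def decodeColor (card : String) : String :=
  match PySem.Str.pyGet? card 0 with
  | some 'r' => "Red"
  | some 'y' => "Yellow"
  | some 'g' => "Green"
  | some 'b' => "Blue"
  | _ => ""          -- Python default color = ''; 'none' (empty card) is excluded by Pre_

def decode (card : String) : String :=
  let color := decodeColor card
  match PySem.Str.pyGet? card 1 with
  | some 'r' => color ++ " Reverse"
  | some 'd' => color ++ " Draw 2"
  | some 's' => color ++ " Skip"
  | some 'w' => if color = "" then "Wild" else "Wild (play " ++ color ++ ")"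
  | some 'f' => if color = "" then "Wild Draw 4" else "Wild Draw 4 (play " ++ color ++ ")"
  | some c => color ++ " " ++ String.ofList [c]
  | none => ""       -- IndexError in Python (card shorter than 2); excluded by Pre_

def readout (hand : List String) : String :=
  (hand.foldl (fun (st : String × Int) card =>
      let english := decode card
      let output := st.1 ++ english
      let output :=
        if st.2 < (hand.length : Int) then output ++ ", "
        else if st.2 = (hand.length : Int) then output ++ ", and "
        else output
      (output, st.2 + 1)) ("", 2)).1

-- ===== PORT B =====
-- port of ', '.join(parts)
def joinComma : List String → String
  | [] => ""
  | [x] => x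
  | x :: y :: r => x ++ ", " ++ joinComma (y :: r)

def readout_alt (hand : List String) : String :=
  let names := hand.map decode
  if names = [] then ""
  else if names.length = 1 then PySem.List.pyGetD names 0 ""
  else joinComma (PySem.List.slice names none (some (-1))) ++ ", and "
         ++ PySem.List.pyGetD names (-1) ""

-- ===== PRECONDITION & SPEC =====
-- Pre_ excludes exactly the hands on which Python A raises IndexError: a card of length < 2.
def Pre_readout (hand : List String) : Prop := ∀ card ∈ hand, 2 ≤ card.toList.length
instance (hand : List String) : Decidable (Pre_readout hand) := by unfold Pre_readout; infer_instance

def pvWitness_readout : List String := ["r3", "gw", "bf"]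

def Spec_readout (hand : List String) (out : String) : Prop := out = readout_alt hand
instance (hand : List String) (out : String) : Decidable (Spec_readout hand out) := by unfold Spec_readout; infer_instance

-- ===== CLAIM (what is proved, stated in full; the proofs are below) =====
def Claim_equal_readout : Prop := ∀ (hand : List String), Dom_readout hand → Pre_readout hand → Spec_readout hand (readout hand)

-- ===== LEMMAS AND PROOFS =====

-- the common English readout, structurally: used only by the proofs
def engl : List String → String
  | [] => ""
  | [a] => decode a
  | a :: b :: r => decode a ++ (if r = [] then ", and " else ", ") ++ engl (b :: r)

theorem readout_loop (n : Int) (cs : List String) : ∀ (acc : String) (c : Int),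
    c = n - cs.length + 2 →
    (cs.foldl (fun (st : String × Int) card =>
        let english := decode card
        let output := st.1 ++ english
        let output :=
          if st.2 < n then output ++ ", "
          else if st.2 = n then output ++ ", and "
          else output
        (output, st.2 + 1)) (acc, c)).1 = acc ++ engl cs := by
  induction cs with
  | nil => intro acc c _; simp [engl]
  | cons a cs ih =>
    intro acc c hc
    simp only [List.length_cons] at hc
    rw [List.foldl_cons]
    cases cs with
    | nil =>
      have h1 : ¬ c < n := by simp at hc; omega
      have h2 : ¬ c = n := by simp at hc; omega
      simp only [if_neg h1, if_neg h2]
      simp [engl]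
    | cons b r =>
      cases r with
      | nil =>
        have h1 : ¬ c < n := by simp at hc; omega
        have h2 : c = n := by simp at hc; omega
        simp only [if_neg h1, if_pos h2]
        rw [ih (acc ++ decode a ++ ", and ") (c + 1) (by simp at hc ⊢; omega)]
        simp [engl, String.append_assoc]
      | cons d r' =>
        have h1 : c < n := by simp at hc; omega
        simp only [if_pos h1]
        rw [ih (acc ++ decode a ++ ", ") (c + 1) (by simp at hc ⊢; omega)]
        simp [engl, String.append_assoc]

theorem readout_eq_engl (hand : List String) : readout hand = engl hand := by
  unfold readout
  rw [readout_loop (hand.length : Int) hand "" 2 (by omega)]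
  simp

theorem engl_pair (r : List String) : ∀ (a b : String),
    engl (a :: b :: r)
      = joinComma (((a :: b :: r).map decode).dropLast)
        ++ ", and " ++ ((a :: b :: r).map decode).getLast (by simp) := by
  induction r with
  | nil =>
    intro a b
    simp [engl, joinComma, String.append_assoc]
  | cons d r' ih =>
    intro a b
    have hstep : engl (a :: b :: d :: r') = decode a ++ ", " ++ engl (b :: d :: r') := by
      simp [engl, String.append_assoc]
    rw [hstep, ih b d]
    simp only [List.map_cons, List.dropLast_cons₂, joinComma]
    rw [List.getLast_cons (by simp)]
    simp [String.append_assoc]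

theorem alt_eq_engl (hand : List String) : readout_alt hand = engl hand := by
  unfold readout_alt
  cases hand with
  | nil => simp [engl]
  | cons a cs =>
    cases cs with
    | nil => simp [engl, PySem.List.pyGetD_zero_cons]
    | cons b r =>
      have hne : ((a :: b :: r).map decode) ≠ [] := by simp
      have hlen : ¬ ((a :: b :: r).map decode).length = 1 := by simp
      simp only [if_neg (by simp : ¬ ((a :: b :: r).map decode) = []), if_neg hlen,
        PySem.List.slice_to_neg_one, PySem.List.pyGetD_neg_one _ _ hne]
      rw [engl_pair r a b]

-- ===== VERDICT (by name: the statement is the Claim_ definition above) =====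
theorem readout_spec : Claim_equal_readout := by
  intro hand _ _
  unfold Spec_readout
  rw [readout_eq_engl, alt_eq_engl]
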